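-- pv_equiv track=rewrite | github.com/bluliosluo/dp-demo | l5/lc_293_flip_game.py | generatePossibleNextMoves
-- ===== SOURCE A (Python) =====
-- from typing import List
--
-- def generatePossibleNextMoves(currentState: str) -> List[str]:
--     currentState = list(currentState)
--     if len(currentState) < 2:
--         return []
--     res = []
--     for i in range(len(currentState) - 1):
--         if currentState[i] != currentState[i + 1]:
--             continue
--         if currentState[i] == '+':
--             currentState[i] = currentState[i + 1] = '-'
--             res.append("".join(currentState))
--             currentState[i] = currentState[i + 1] = '+'
--     return res
-- ===== SOURCE B (Python) =====
-- from typing import List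
--
-- def generatePossibleNextMoves(currentState: str) -> List[str]:
--     res = []
--     prefix = ''
--     rest = currentState
--     while len(rest) >= 2:
--         if rest[0] == '+' and rest[1] == '+':
--             res.append(prefix + '--' + rest[2:])
--         prefix += rest[0]
--         rest = rest[1:]
--     return res
-- ===== Notes on version B (the rewrite author's own statement) =====
-- stated objective: alternative
-- what changed: Replaces A's index loop over a mutable character list (flip a plus-pair in place, join the whole list, flip back) by a structural left-to-right sweep that keeps a prefix/suffix split of the immutable string and emits each successor state by concatenating the prefix, two dash characters, and the tail of the suffix.
import Mathlib
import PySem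

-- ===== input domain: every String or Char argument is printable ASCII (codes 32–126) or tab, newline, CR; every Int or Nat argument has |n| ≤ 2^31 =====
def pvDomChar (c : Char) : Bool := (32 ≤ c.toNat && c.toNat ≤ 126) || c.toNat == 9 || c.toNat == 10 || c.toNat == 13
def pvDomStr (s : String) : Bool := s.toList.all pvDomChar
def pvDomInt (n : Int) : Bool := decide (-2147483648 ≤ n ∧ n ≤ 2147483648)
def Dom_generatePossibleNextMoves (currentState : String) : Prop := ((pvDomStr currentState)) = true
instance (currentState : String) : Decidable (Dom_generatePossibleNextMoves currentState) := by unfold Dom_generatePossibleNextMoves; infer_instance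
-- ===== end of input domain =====

-- B replaces A's index loop over a mutable char list (flip a plus-pair in place, join, flip back)
-- by a structural sweep keeping a prefix/suffix split of the immutable string; no mutation.

-- ===== PORT A =====
-- The in-place flip is undone right after the append, so every iteration reads the original
-- character list cs; the momentarily mutated list is (cs.set i '-').set (i+1) '-' (i, i+1 in range).
def generatePossibleNextMoves (currentState : String) : List String :=
  let cs := currentState.toList
  if cs.length < 2 then []
  else
    (List.range (cs.length - 1)).foldl
      (fun res i =>
        if cs.getD i ' ' ≠ cs.getD (i + 1) ' ' then res
        else if cs.getD i ' ' = '+' then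
          res ++ [String.ofList ((cs.set i '-').set (i + 1) '-')]
        else res) []

-- ===== PORT B =====
-- the while loop: `while len(rest) >= 2`, emit prefix, two dashes and rest[2:] when both head
-- characters are plus, then `prefix += rest[0]; rest = rest[1:]` — structural recursion on rest.
def pvAltGo (pre : List Char) (rest : List Char) (res : List String) : List String :=
  match rest with
  | c1 :: c2 :: tail =>
    pvAltGo (pre ++ [c1]) (c2 :: tail)
      (if c1 = '+' ∧ c2 = '+' then res ++ [String.ofList (pre ++ '-' :: '-' :: tail)] else res)
  | _ => res

def generatePossibleNextMoves_alt (currentState : String) : List String :=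
  pvAltGo [] currentState.toList []

-- ===== PRECONDITION & SPEC =====
def Spec_generatePossibleNextMoves (currentState : String) (out : List String) : Prop := out = generatePossibleNextMoves_alt currentState
instance (currentState : String) (out : List String) : Decidable (Spec_generatePossibleNextMoves currentState out) := by unfold Spec_generatePossibleNextMoves; infer_instance

-- ===== CLAIM (what is proved, stated in full; the proofs are below) =====
def Claim_equal_generatePossibleNextMoves : Prop := ∀ (currentState : String), Dom_generatePossibleNextMoves currentState → Spec_generatePossibleNextMoves currentState (generatePossibleNextMoves currentState)

-- ===== LEMMAS AND PROOFS =====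

-- an index i where a plus-pair occurs, and the successor state produced there
def pvOcc (cs : List Char) (i : Nat) : Bool :=
  decide (i + 2 ≤ cs.length) && decide (cs.getD i ' ' = '+') && decide (cs.getD (i + 1) ' ' = '+')
def pvBuild (cs : List Char) (i : Nat) : String := String.ofList (cs.take i ++ '-' :: '-' :: cs.drop (i + 2))

theorem pv_drop_two {cs : List Char} {i : Nat} (h : i + 2 ≤ cs.length) :
    cs.drop i = cs[i]'(by omega) :: cs[i+1]'(by omega) :: cs.drop (i + 2) := by
  rw [List.drop_eq_getElem_cons (by omega), List.drop_eq_getElem_cons (by omega)]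

theorem pv_occ_getElem {cs : List Char} {i : Nat} (h : i + 2 ≤ cs.length) :
    pvOcc cs i = (decide (cs[i]'(by omega) = '+') && decide (cs[i+1]'(by omega) = '+')) := by
  rw [pvOcc, List.getD_eq_getElem _ _ (by omega), List.getD_eq_getElem _ _ (by omega),
      decide_eq_true (by omega : i + 2 ≤ cs.length)]
  simp

theorem pv_setset {cs : List Char} {i : Nat} (h : i + 2 ≤ cs.length) :
    (cs.set i '-').set (i + 1) '-' = cs.take i ++ '-' :: '-' :: cs.drop (i + 2) := by
  have hti : (cs.take i).length = i := by simp [List.length_take]; omega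
  have key : ∀ (t : List Char) (a b : Char) (r : List Char), t.length = i →
      ((t ++ a :: b :: r).set i '-').set (i + 1) '-' = t ++ '-' :: '-' :: r := by
    intro t a b r ht
    rw [List.set_append, if_neg (by omega), ht, Nat.sub_self, List.set_cons_zero,
        List.set_append, if_neg (by omega), ht, (by omega : i + 1 - i = 1),
        List.set_cons_succ, List.set_cons_zero]
  conv_lhs => rw [← List.take_append_drop i cs, pv_drop_two h]
  exact key _ _ _ _ hti

-- A's result is the occurrence list mapped through pvBuild
theorem pv_A_eq (s : String) :
    generatePossibleNextMoves s =
      ((List.range (s.toList.length - 1)).filter (pvOcc s.toList)).map (pvBuild s.toList) := by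
  unfold generatePossibleNextMoves
  set cs := s.toList with hcs
  by_cases hlen : cs.length < 2
  · rw [if_pos hlen]
    have : cs.length - 1 = 0 := by omega
    rw [this]
    simp
  · rw [if_neg hlen]
    have hcongr := PySem.List.foldl_congr_mem
        (l := List.range (cs.length - 1)) (init := ([] : List String))
        (f := fun res i =>
          if cs.getD i ' ' ≠ cs.getD (i + 1) ' ' then res
          else if cs.getD i ' ' = '+' then
            res ++ [String.ofList ((cs.set i '-').set (i + 1) '-')]
          else res)
        (g := fun res i => if pvOcc cs i then res ++ [pvBuild cs i] else res)
        (by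
          intro acc i hi
          dsimp only
          have hi' : i + 2 ≤ cs.length := by
            have := List.mem_range.mp hi; omega
          by_cases ho : pvOcc cs i = true
          · have hocc := ho
            rw [pvOcc] at hocc
            simp only [Bool.and_eq_true, decide_eq_true_eq] at hocc
            obtain ⟨⟨-, ha⟩, hb⟩ := hocc
            rw [if_pos ho, if_neg (not_not_intro (ha.trans hb.symm)), if_pos ha,
                pvBuild, pv_setset hi']
          · rw [if_neg ho]
            have ho' : ¬ (cs.getD i ' ' = '+' ∧ cs.getD (i + 1) ' ' = '+') := by
              intro ⟨ha, hb⟩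
              exact ho (by rw [pvOcc, decide_eq_true hi', decide_eq_true ha, decide_eq_true hb]; rfl)
            rw [not_and_or] at ho'
            by_cases he : cs.getD i ' ' = cs.getD (i + 1) ' '
            · rcases ho' with ho' | ho'
              · rw [if_neg (not_not_intro he), if_neg ho']
              · rw [if_neg (not_not_intro he), if_neg (by rw [he]; exact ho')]
            · rw [if_pos he])
    rw [hcongr, PySem.List.foldl_append_if]
    simp

-- B's sweep, positioned after the first k characters, appends exactly the occurrences ≥ k
theorem pv_go_spec (cs : List Char) :
    ∀ (m k : Nat), k ≤ cs.length → cs.length - k ≤ m → ∀ res,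
      pvAltGo (cs.take k) (cs.drop k) res =
        res ++ ((List.range' k (cs.length - 1 - k)).filter (pvOcc cs)).map (pvBuild cs) := by
  intro m
  induction m with
  | zero =>
    intro k hk hm res
    have hkeq : k = cs.length := by omega
    rw [hkeq]
    simp [pvAltGo]
  | succ m ih =>
    intro k hk hm res
    by_cases h2 : k + 2 ≤ cs.length
    · rw [pv_drop_two h2, pvAltGo,
          ← List.drop_eq_getElem_cons (show k + 1 < cs.length by omega),
          (by rw [List.take_add_one, List.getElem?_eq_getElem (by omega)]; rfl :
            cs.take k ++ [cs[k]'(by omega)] = cs.take (k + 1)),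
          ih (k + 1) (by omega) (by omega)]
      have hsplit : List.range' k (cs.length - 1 - k) =
          k :: List.range' (k + 1) (cs.length - 1 - (k + 1)) := by
        rw [(by omega : cs.length - 1 - k = (cs.length - 1 - (k + 1)) + 1), List.range'_succ]
      rw [hsplit, List.filter_cons]
      by_cases ho : pvOcc cs k = true
      · have hif : cs[k]'(by omega) = '+' ∧ cs[k+1]'(by omega) = '+' := by
          rw [pv_occ_getElem h2, Bool.and_eq_true, decide_eq_true_iff, decide_eq_true_iff] at ho
          exact ho
        rw [if_pos hif, if_pos ho]
        simp [pvBuild, List.append_assoc]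
      · have hif : ¬ (cs[k]'(by omega) = '+' ∧ cs[k+1]'(by omega) = '+') := by
          intro hc
          apply ho
          rw [pv_occ_getElem h2, Bool.and_eq_true, decide_eq_true_iff, decide_eq_true_iff]
          exact hc
        rw [if_neg hif, if_neg (by simpa using ho)]
    · -- fewer than two characters remain: the sweep stops and no occurrence index is left
      have hr : cs.length - 1 - k = 0 := by omega
      rw [hr]
      rcases (by omega : k = cs.length ∨ k + 1 = cs.length) with hkeq | hkeq
      · rw [(by rw [hkeq]; simp : cs.drop k = [])]
        simp [pvAltGo]
      · rw [List.drop_eq_getElem_cons (by omega : k < cs.length),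
            (by rw [hkeq]; simp : cs.drop (k + 1) = [])]
        simp [pvAltGo]

-- B's result is the same occurrence list mapped through pvBuild
theorem pv_B_eq (s : String) :
    generatePossibleNextMoves_alt s =
      ((List.range (s.toList.length - 1)).filter (pvOcc s.toList)).map (pvBuild s.toList) := by
  unfold generatePossibleNextMoves_alt
  have h0 := pv_go_spec s.toList s.toList.length 0 (by omega) (by omega) []
  simp only [List.take_zero, List.drop_zero, Nat.sub_zero, ← List.range_eq_range'] at h0
  simpa using h0

-- ===== VERDICT (by name: the statement is the Claim_ definition above) =====
theorem generatePossibleNextMoves_spec : Claim_equal_generatePossibleNextMoves := by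
  intro s _
  unfold Spec_generatePossibleNextMoves
  rw [pv_A_eq, pv_B_eq]
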